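-- pv_equiv track=rewrite | github.com/maikl88/Multiplicative_Congruential_Generator | tests/test_linear_profile.py | calculate_complexity_profile
-- ===== SOURCE A (Python) =====
-- def berlekamp_massey(sequence):
--     """
--     Реализация алгоритма Берлекампа-Мэсси для вычисления линейной сложности
--     последовательности
--     """
--     n = len(sequence)
--     c = [0] * n  # текущий LFSR
--     b = [0] * n  # предыдущий LFSR
--     c[0], b[0] = 1, 1
--
--     L, m = 0, -1  # L - длина LFSR, m - последнее изменение
--
--     for i in range(n):
--         d = sequence[i]  # вычисление расхождения
--         for j in range(1, L + 1):
--             d ^= c[j] & sequence[i - j]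
--
--         if d:  # если есть расхождение
--             t = c.copy()
--             for j in range(i - m):
--                 if i - j < n:
--                     c[i - j] ^= b[j]
--             if L <= i // 2:
--                 L = i + 1 - L
--                 m = i
--                 b = t
--
--     return L
--
-- def calculate_complexity_profile(sequence):
--     """
--     Вычисляет профиль линейной сложности для последовательности
--     """
--     n = len(sequence)
--     profile = []
--
--     for k in range(1, n + 1):
--         subsequence = sequence[:k]
--         complexity = berlekamp_massey(subsequence)
--         profile.append(complexity)
--
--     return profile
-- ===== SOURCE B (Python) =====
-- def calculate_complexity_profile(sequence):
--     """One incremental Berlekamp-Massey pass over growing polynomial lists,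
--     recording the LFSR length after each element."""
--     profile = []
--     hist = []          # already-processed elements, newest first
--     c, b = [1], [1]    # LFSR polynomials kept only up to their highest written index
--     L, m = 0, -1
--     for x in sequence:
--         i = len(hist)
--         d = x
--         for cj, sj in zip(c[1:L + 1], hist):
--             d ^= cj & sj
--         if d:
--             t = list(c)
--             c = c + [0] * (i + 1 - len(c))
--             for j, bj in enumerate(b):
--                 if j < i - m:
--                     c[i - j] ^= bj
--             if 2 * L <= i:
--                 L, m, b = i + 1 - L, i, t
--         hist.insert(0, x)
--         profile.append(L)
--     return profile
-- ===== Notes on version B (the rewrite author's own statement) =====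
-- stated objective: faster
-- what changed: Instead of rerunning Berlekamp-Massey from scratch on every prefix over fixed size-n arrays (O(n^3)), B makes one incremental Berlekamp-Massey pass that recurses over the sequence, keeps the LFSR polynomials as growing variable-length lists (discrepancy via zip with the reversed processed prefix, update via enumerate of b), and records L after each element.
import Mathlib
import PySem

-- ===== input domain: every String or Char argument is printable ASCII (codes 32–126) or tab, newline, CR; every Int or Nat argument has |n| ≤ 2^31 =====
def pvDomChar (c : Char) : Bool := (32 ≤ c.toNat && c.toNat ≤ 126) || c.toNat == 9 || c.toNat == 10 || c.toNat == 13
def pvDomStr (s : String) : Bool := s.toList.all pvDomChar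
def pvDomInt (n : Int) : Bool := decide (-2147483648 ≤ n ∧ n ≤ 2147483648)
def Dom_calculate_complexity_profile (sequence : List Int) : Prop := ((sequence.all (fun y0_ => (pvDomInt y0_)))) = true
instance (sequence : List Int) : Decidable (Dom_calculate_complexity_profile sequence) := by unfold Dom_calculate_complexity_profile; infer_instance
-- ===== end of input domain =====

-- B replaces A's "rerun Berlekamp-Massey on every prefix over fixed-size arrays" (cubic) by one
-- incremental recursive Berlekamp-Massey pass over growing polynomial lists; measurably faster (asymptotic).


-- ===== PORT A =====
-- A's helper berlekamp_massey: fixed size-n arrays c,b, L/m ints; loops become foldl's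
-- over the same state.  All reads/writes are in range here, so the total forms pyGetD/pySetD are exact.
def pvA_bm (sequence : List Int) : Int :=
  let n : Int := sequence.length
  -- c = [0]*n; b = [0]*n; c[0], b[0] = 1, 1   (n ≥ 1 whenever A calls this)
  let c0 : List Int := PySem.List.pySetD (List.replicate sequence.length 0) 0 1
  let b0 : List Int := PySem.List.pySetD (List.replicate sequence.length 0) 0 1
  let st :=
    (PySem.List.pyRange 0 n 1).foldl
      (fun (st : List Int × List Int × Int × Int) (i : Int) =>
        match st with
        | (c, b, L, m) =>
          let d :=
            (PySem.List.pyRange 1 (L + 1) 1).foldl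
              (fun d j => PySem.Int.bxor d
                (PySem.Int.band (PySem.List.pyGetD c j 0) (PySem.List.pyGetD sequence (i - j) 0)))
              (PySem.List.pyGetD sequence i 0)
          if d ≠ 0 then
            let t := c
            let c' :=
              (PySem.List.pyRange 0 (i - m) 1).foldl
                (fun cc j =>
                  if i - j < n then
                    PySem.List.pySetD cc (i - j)
                      (PySem.Int.bxor (PySem.List.pyGetD cc (i - j) 0) (PySem.List.pyGetD b j 0))
                  else cc)
                c
            if L ≤ PySem.Int.floordiv i 2 then (c', t, i + 1 - L, i) else (c', b, L, m)
          else (c, b, L, m))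
      (c0, b0, 0, -1)
  st.2.2.1

def calculate_complexity_profile (sequence : List Int) : List Int :=
  let n : Int := sequence.length
  (PySem.List.pyRange 1 (n + 1) 1).foldl
    (fun profile k => profile ++ [pvA_bm (PySem.List.slice sequence none (some k))])
    []

-- ===== PORT B =====
-- One incremental Berlekamp-Massey pass, recursing over the sequence; the LFSR polynomials are
-- growing variable-length lists (c = c + [0]*(i+1-len(c))), the discrepancy is a zip of c[1:L+1]
-- with the reversed processed prefix, the update iterates enumerate(b).
def pvB_pad (c : List Int) (i : Int) : List Int :=
  c ++ List.replicate (i + 1 - (c.length : Int)).toNat 0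

def pvB_upd (c b : List Int) (i m : Int) : List Int :=
  (PySem.List.enumerate b 0).foldl
    (fun cc jb =>
      if jb.1 < i - m then
        PySem.List.pySetD cc (i - jb.1)
          (PySem.Int.bxor (PySem.List.pyGetD cc (i - jb.1) 0) jb.2)
      else cc) c

def pvB_loop (rest hist c b : List Int) (L m : Int) (profile : List Int) : List Int :=
  match rest with
  | [] => profile
  | x :: xs =>
    let i : Int := hist.length
    let d := (List.zip (PySem.List.slice c (some 1) (some (L + 1))) hist).foldl
      (fun d p => PySem.Int.bxor d (PySem.Int.band p.1 p.2)) x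
    if d ≠ 0 then
      let t := c
      let c2 := pvB_upd (pvB_pad c i) b i m
      if 2 * L ≤ i then
        pvB_loop xs (x :: hist) c2 t (i + 1 - L) i (profile ++ [i + 1 - L])
      else
        pvB_loop xs (x :: hist) c2 b L m (profile ++ [L])
    else pvB_loop xs (x :: hist) c b L m (profile ++ [L])

def calculate_complexity_profile_alt (sequence : List Int) : List Int :=
  pvB_loop sequence [] [1] [1] 0 (-1) []

-- ===== PRECONDITION & SPEC =====
def Spec_calculate_complexity_profile (sequence : List Int) (out : List Int) : Prop := out = calculate_complexity_profile_alt sequence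
instance (sequence : List Int) (out : List Int) : Decidable (Spec_calculate_complexity_profile sequence out) := by unfold Spec_calculate_complexity_profile; infer_instance

-- ===== CLAIM (what is proved, stated in full; the proofs are below) =====
def Claim_equal_calculate_complexity_profile : Prop := ∀ (sequence : List Int), Dom_calculate_complexity_profile sequence → Spec_calculate_complexity_profile sequence (calculate_complexity_profile sequence)

-- ===== LEMMAS AND PROOFS =====

-- Shared semantic core: one Berlekamp-Massey step of A (no index guard; the guard in A's
-- update loop is always true when 0 <= i < n, proved below).
def pvInit (seq : List Int) : List Int × List Int × Int × Int :=
  (PySem.List.pySetD (List.replicate seq.length 0) 0 1,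
   PySem.List.pySetD (List.replicate seq.length 0) 0 1, 0, -1)

def pvDisc (seq c : List Int) (i L : Int) : Int :=
  (PySem.List.pyRange 1 (L + 1) 1).foldl
    (fun d j => PySem.Int.bxor d
      (PySem.Int.band (PySem.List.pyGetD c j 0) (PySem.List.pyGetD seq (i - j) 0)))
    (PySem.List.pyGetD seq i 0)

def pvUpd (c b : List Int) (i m : Int) : List Int :=
  (PySem.List.pyRange 0 (i - m) 1).foldl
    (fun cc j => PySem.List.pySetD cc (i - j)
      (PySem.Int.bxor (PySem.List.pyGetD cc (i - j) 0) (PySem.List.pyGetD b j 0)))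
    c

def pvUpdA (n : Int) (c b : List Int) (i m : Int) : List Int :=
  (PySem.List.pyRange 0 (i - m) 1).foldl
    (fun cc j =>
      if i - j < n then
        PySem.List.pySetD cc (i - j)
          (PySem.Int.bxor (PySem.List.pyGetD cc (i - j) 0) (PySem.List.pyGetD b j 0))
      else cc)
    c

def pvStep (seq : List Int) (st : List Int × List Int × Int × Int) (i : Int) :
    List Int × List Int × Int × Int :=
  match st with
  | (c, b, L, m) =>
    let d := pvDisc seq c i L
    if d ≠ 0 then
      let c' := pvUpd c b i m
      if L ≤ PySem.Int.floordiv i 2 then (c', c, i + 1 - L, i) else (c', b, L, m)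
    else (c, b, L, m)

def pvStepA (seq : List Int) (n : Int) (st : List Int × List Int × Int × Int) (i : Int) :
    List Int × List Int × Int × Int :=
  match st with
  | (c, b, L, m) =>
    let d := pvDisc seq c i L
    if d ≠ 0 then
      let c' := pvUpdA n c b i m
      if L ≤ PySem.Int.floordiv i 2 then (c', c, i + 1 - L, i) else (c', b, L, m)
    else (c, b, L, m)

def pvRun (seq : List Int) (k : Nat) : List Int × List Int × Int × Int :=
  (List.range k).foldl (fun st (j : Nat) => pvStep seq st (j : Int)) (pvInit seq)

def pvRunA (seq : List Int) (n : Int) (k : Nat) : List Int × List Int × Int × Int :=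
  (List.range k).foldl (fun st (j : Nat) => pvStepA seq n st (j : Int)) (pvInit seq)

def pvTrunc (k : Nat) (st : List Int × List Int × Int × Int) :
    List Int × List Int × Int × Int :=
  (st.1.take k, st.2.1.take k, st.2.2.1, st.2.2.2)

def pvInv (seq : List Int) (k : Nat) (st : List Int × List Int × Int × Int) : Prop :=
  st.1.length = seq.length ∧ st.2.1.length = seq.length ∧
    0 ≤ st.2.2.1 ∧ st.2.2.1 ≤ (k : Int) ∧ -1 ≤ st.2.2.2 ∧ st.2.2.2 < (k : Int)

lemma pvRun_succ (seq : List Int) (k : Nat) :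
    pvRun seq (k + 1) = pvStep seq (pvRun seq k) (k : Int) := by
  simp [pvRun, List.range_succ]

lemma pvRunA_succ (seq : List Int) (n : Int) (k : Nat) :
    pvRunA seq n (k + 1) = pvStepA seq n (pvRunA seq n k) (k : Int) := by
  simp [pvRunA, List.range_succ]

lemma pvFold_pyRange {α : Type} (f : α → Int → α) (init : α) (n : Nat) :
    (PySem.List.pyRange 0 (n : Int) 1).foldl f init
      = (List.range n).foldl (fun st (j : Nat) => f st (j : Int)) init := by
  rw [PySem.List.pyRange_one]
  have h : ((n : Int) - 0).toNat = n := by omega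
  rw [h, List.foldl_map]
  simp only [zero_add]

lemma pvA_bm_eq (seq : List Int) :
    pvA_bm seq = (pvRunA seq (seq.length : Int) seq.length).2.2.1 := by
  unfold pvA_bm pvRunA pvInit
  dsimp only
  rw [pvFold_pyRange]
  refine congrArg (fun st : List Int × List Int × Int × Int => st.2.2.1) ?_
  apply PySem.List.foldl_congr_mem
  intro acc x _
  obtain ⟨c, b, L, m⟩ := acc
  rfl

lemma pvLength_pvUpd (c b : List Int) (i m : Int) : (pvUpd c b i m).length = c.length := by
  unfold pvUpd
  generalize PySem.List.pyRange 0 (i - m) 1 = l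
  induction l generalizing c with
  | nil => rfl
  | cons x xs ih => simp only [List.foldl_cons]; rw [ih, PySem.List.length_pySetD]

lemma pvInv_step (seq : List Int) (k : Nat) (st : List Int × List Int × Int × Int)
    (h : pvInv seq k st) : pvInv seq (k + 1) (pvStep seq st (k : Int)) := by
  obtain ⟨c, b, L, m⟩ := st
  simp only [pvInv] at h ⊢
  obtain ⟨h1, h2, h3, h4, h5, h6⟩ := h
  have hfd : PySem.Int.floordiv (k : Int) 2 = ((k / 2 : Nat) : Int) := PySem.Int.floordiv_natCast k 2
  simp only [pvStep]
  split_ifs with hd hL <;> rw [hfd] at * <;> dsimp only <;>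
    refine ⟨?_, ?_, ?_, ?_, ?_, ?_⟩ <;>
    first
      | (rw [pvLength_pvUpd]; exact h1)
      | exact h1
      | exact h2
      | omega

lemma pvInv_run (seq : List Int) (k : Nat) : pvInv seq k (pvRun seq k) := by
  induction k with
  | zero =>
    simp [pvRun, pvInit, pvInv, PySem.List.length_pySetD]
  | succ i ih =>
    rw [pvRun_succ]
    exact pvInv_step seq i _ ih

lemma pvGetD_take (xs : List Int) (k : Nat) (j : Int) (h0 : 0 ≤ j) (hj : j < (k : Int))
    (hk : k ≤ xs.length) : PySem.List.pyGetD (xs.take k) j 0 = PySem.List.pyGetD xs j 0 := by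
  rw [PySem.List.pyGetD_eq_getElem _ _ h0 (by simp [List.length_take]; omega),
    PySem.List.pyGetD_eq_getElem _ _ h0 (by omega)]
  exact List.getElem_take

lemma pvSetD_take (xs : List Int) (k : Nat) (i v : Int) (h0 : 0 ≤ i) :
    PySem.List.pySetD (xs.take k) i v = (PySem.List.pySetD xs i v).take k := by
  rw [PySem.List.pySetD_of_nonneg _ _ h0, PySem.List.pySetD_of_nonneg _ _ h0, List.take_set]

lemma pvDisc_take (seq c : List Int) (k : Nat) (i L : Int) (h0 : 0 ≤ i) (hi : i < (k : Int))
    (hLi : L ≤ i) (hks : k ≤ seq.length) (hkc : k ≤ c.length) :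
    pvDisc (seq.take k) (c.take k) i L = pvDisc seq c i L := by
  unfold pvDisc
  rw [pvGetD_take seq k i h0 hi hks]
  apply PySem.List.foldl_congr_mem
  intro acc j hj
  rw [PySem.List.mem_pyRange_one] at hj
  rw [pvGetD_take c k j (by omega) (by omega) hkc,
    pvGetD_take seq k (i - j) (by omega) (by omega) hks]

lemma pvUpd_fold_take (k : Nat) (b : List Int) (i : Int) (hkb : k ≤ b.length)
    (l : List Int) (hl : ∀ j ∈ l, 0 ≤ j ∧ j < (k : Int) ∧ 0 ≤ i - j ∧ i - j < (k : Int)) :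
    ∀ (c : List Int), k ≤ c.length →
      l.foldl (fun cc j =>
          if i - j < (k : Int) then
            PySem.List.pySetD cc (i - j)
              (PySem.Int.bxor (PySem.List.pyGetD cc (i - j) 0)
                (PySem.List.pyGetD (b.take k) j 0))
          else cc) (c.take k)
        = (l.foldl (fun cc j =>
            PySem.List.pySetD cc (i - j)
              (PySem.Int.bxor (PySem.List.pyGetD cc (i - j) 0) (PySem.List.pyGetD b j 0))) c).take k := by
  induction l with
  | nil => intro c _; rfl
  | cons x xs ih =>
    intro c hc
    obtain ⟨hx0, hxk, hix0, hixk⟩ := hl x (List.mem_cons_self)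
    simp only [List.foldl_cons]
    rw [if_pos hixk, pvGetD_take c k (i - x) hix0 hixk hc, pvGetD_take b k x hx0 hxk hkb,
      pvSetD_take c k (i - x) _ hix0]
    exact ih (fun j hj => hl j (List.mem_cons_of_mem x hj)) _
      (by rw [PySem.List.length_pySetD]; exact hc)

lemma pvUpdA_take (k : Nat) (c b : List Int) (i m : Int) (hi : i < (k : Int))
    (hm : -1 ≤ m) (hkc : k ≤ c.length) (hkb : k ≤ b.length) :
    pvUpdA (k : Int) (c.take k) (b.take k) i m = (pvUpd c b i m).take k := by
  unfold pvUpdA pvUpd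
  exact pvUpd_fold_take k b i hkb _
    (fun j hj => by rw [PySem.List.mem_pyRange_one] at hj; omega) c hkc

lemma pvStep_take (seq : List Int) (k : Nat) (st : List Int × List Int × Int × Int) (i : Int)
    (h0 : 0 ≤ i) (hi : i < (k : Int)) (hk : k ≤ seq.length)
    (hc : st.1.length = seq.length) (hb : st.2.1.length = seq.length)
    (hL : st.2.2.1 ≤ i) (hm : -1 ≤ st.2.2.2) :
    pvStepA (seq.take k) (k : Int) (pvTrunc k st) i = pvTrunc k (pvStep seq st i) := by
  obtain ⟨c, b, L, m⟩ := st
  simp only at hc hb hL hm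
  simp only [pvStepA, pvStep, pvTrunc]
  rw [pvDisc_take seq c k i L h0 hi hL hk (by omega)]
  split_ifs with hd hcond
  · rw [pvUpdA_take k c b i m hi hm (by omega) (by omega)]
  · rw [pvUpdA_take k c b i m hi hm (by omega) (by omega)]
  · rfl

lemma pvSetRep_take (k n : Nat) (hk : k ≤ n) :
    PySem.List.pySetD (List.replicate k (0 : Int)) 0 1
      = (PySem.List.pySetD (List.replicate n (0 : Int)) 0 1).take k := by
  cases k with
  | zero => rfl
  | succ k' =>
    obtain ⟨n', rfl⟩ : ∃ n', n = n' + 1 := ⟨n - 1, by omega⟩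
    rw [List.replicate_succ, List.replicate_succ,
      PySem.List.pySetD_of_nonneg _ _ le_rfl, PySem.List.pySetD_of_nonneg _ _ le_rfl]
    simp only [Int.toNat_zero, List.set_cons_zero, List.take_succ_cons, List.take_replicate]
    rw [Nat.min_eq_left (by omega)]

lemma pvInit_take (seq : List Int) (k : Nat) (hk : k ≤ seq.length) :
    pvInit (seq.take k) = pvTrunc k (pvInit seq) := by
  simp only [pvInit, pvTrunc, List.length_take, Nat.min_eq_left hk]
  rw [pvSetRep_take k seq.length hk]

lemma pvRunA_take (seq : List Int) (k : Nat) (hk : k ≤ seq.length) :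
    ∀ i : Nat, i ≤ k → pvRunA (seq.take k) (k : Int) i = pvTrunc k (pvRun seq i) := by
  intro i
  induction i with
  | zero =>
    intro _
    simpa [pvRunA, pvRun] using pvInit_take seq k hk
  | succ i ih =>
    intro hik
    rw [pvRunA_succ, pvRun_succ, ih (by omega)]
    obtain ⟨h1, h2, h3, h4, h5, h6⟩ := pvInv_run seq i
    exact pvStep_take seq k (pvRun seq i) (i : Int) (by omega) (by omega) hk h1 h2 h4 h5

lemma pvA_eq (seq : List Int) :
    calculate_complexity_profile seq
      = (List.range seq.length).map (fun t => (pvRun seq (t + 1)).2.2.1) := by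
  unfold calculate_complexity_profile
  dsimp only
  rw [PySem.List.foldl_append_singleton_eq_map, List.nil_append, PySem.List.pyRange_one]
  have h1 : ((seq.length : Int) + 1 - 1).toNat = seq.length := by omega
  rw [h1, List.map_map]
  apply List.map_congr_left
  intro t ht
  rw [List.mem_range] at ht
  show pvA_bm (PySem.List.slice seq none (some (1 + (t : Int)))) = _
  have h2 : (1 + (t : Int)) = ((t + 1 : Nat) : Int) := by push_cast; ring
  rw [h2, PySem.List.slice_to_natCast, pvA_bm_eq]
  have h3 : (seq.take (t + 1)).length = t + 1 := by rw [List.length_take]; omega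
  rw [h3, pvRunA_take seq (t + 1) (by omega) (t + 1) le_rfl]
  rfl

-- ---------- B side ----------

lemma pvBandZeroL (y : Int) : PySem.Int.band 0 y = 0 := by
  rw [PySem.Int.band_comm]; exact PySem.Int.band_zero y

lemma pvGetD_zext (c : List Int) (z i : Nat) :
    (c ++ List.replicate z (0 : Int)).getD i 0 = c.getD i 0 := by
  simp only [List.getD_eq_getElem?_getD, List.getElem?_append]
  split
  · rfl
  · rw [List.getElem?_eq_none (l := c) (by omega), List.getElem?_replicate]
    split <;> rfl

lemma pvPyGetD_zext (c : List Int) (z : Nat) (i : Int) (h0 : 0 ≤ i) :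
    PySem.List.pyGetD (c ++ List.replicate z (0 : Int)) i 0 = c.getD i.toNat 0 := by
  have h : i = (i.toNat : Int) := by omega
  rw [h, PySem.List.pyGetD_natCast, pvGetD_zext]
  simp only [List.getD_eq_getElem?_getD]
  rw [Int.toNat_natCast]

lemma pvFoldl_id {α β : Type} (f : α → β → α) (l : List β) (x : α)
    (h : ∀ acc a, a ∈ l → f acc a = acc) : l.foldl f x = x := by
  induction l generalizing x with
  | nil => rfl
  | cons y ys ih =>
    rw [List.foldl_cons, h x y List.mem_cons_self]
    exact ih x (fun acc a ha => h acc a (List.mem_cons_of_mem y ha))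

lemma pvZipfold_eq (LN : Nat) : ∀ (cs hs : List Int) (x : Int), LN ≤ hs.length →
    (List.zip (cs.take LN) hs).foldl
        (fun d p => PySem.Int.bxor d (PySem.Int.band p.1 p.2)) x
      = (List.range LN).foldl
          (fun d j => PySem.Int.bxor d (PySem.Int.band (cs.getD j 0) (hs.getD j 0))) x := by
  induction LN with
  | zero => intro cs hs x _; rfl
  | succ k ih =>
    intro cs hs x hk
    cases hs with
    | nil => simp at hk
    | cons h1 hs' =>
      rw [List.range_succ_eq_map]
      cases cs with
      | nil =>
        simp only [List.take_nil, List.zip_nil_left, List.foldl_nil, List.foldl_cons,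
          List.foldl_map, List.getD_nil, pvBandZeroL, PySem.Int.bxor_zero]
        refine (pvFoldl_id _ _ _ ?_).symm
        intro acc a _
        simp
      | cons c1 cs' =>
        simp only [List.take_succ_cons, List.zip_cons_cons, List.foldl_cons, List.foldl_map]
        rw [ih cs' hs' _ (by simpa using hk)]
        rfl

lemma pvGetD_drop (l : List Int) (n m : Nat) : (l.drop n).getD m 0 = l.getD (n + m) 0 := by
  simp [List.getD_eq_getElem?_getD, List.getElem?_drop]

lemma pvGetD_revtake (seq : List Int) (t j : Nat) (hj : j < t) (ht : t ≤ seq.length) :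
    ((seq.take t).reverse).getD j 0 = seq.getD (t - 1 - j) 0 := by
  rw [List.getD_eq_getElem?_getD, List.getD_eq_getElem?_getD,
    List.getElem?_eq_getElem (by simp; omega), List.getElem?_eq_getElem (by omega)]
  simp only [List.getElem_reverse, List.getElem_take, Option.getD_some]
  congr 1
  simp
  omega


lemma pvDisc_eq (seq cB : List Int) (z t LN : Nat) (hL : LN ≤ t) (ht : t < seq.length) :
    (List.zip (PySem.List.slice cB (some 1) (some ((LN : Int) + 1))) ((seq.take t).reverse)).foldl
        (fun d p => PySem.Int.bxor d (PySem.Int.band p.1 p.2)) (seq.getD t 0)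
      = pvDisc seq (cB ++ List.replicate z 0) (t : Int) (LN : Int) := by
  have hslice : PySem.List.slice cB (some 1) (some ((LN : Int) + 1)) = (cB.drop 1).take LN := by
    rw [show ((LN : Int) + 1) = (((LN + 1 : Nat)) : Int) by push_cast; ring,
      show (1 : Int) = ((1 : Nat) : Int) by norm_num, PySem.List.slice_natCast,
      Nat.add_sub_cancel]
  rw [hslice, pvZipfold_eq LN _ _ _ (by simp; omega)]
  unfold pvDisc
  rw [PySem.List.pyRange_one]
  have h3 : ((LN : Int) + 1 - 1).toNat = LN := by omega
  rw [h3, List.foldl_map]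
  have h4 : PySem.List.pyGetD seq (t : Int) 0 = seq.getD t 0 := PySem.List.pyGetD_natCast seq t 0
  rw [h4]
  apply PySem.List.foldl_congr_mem
  intro acc k hk
  rw [List.mem_range] at hk
  have e1 : PySem.List.pyGetD (cB ++ List.replicate z 0) (1 + (k : Int)) 0
      = (cB.drop 1).getD k 0 := by
    rw [pvPyGetD_zext cB z (1 + (k : Int)) (by omega),
      show ((1 : Int) + k).toNat = 1 + k by omega, ← pvGetD_drop]
  have e2 : PySem.List.pyGetD seq ((t : Int) - (1 + k)) 0
      = ((seq.take t).reverse).getD k 0 := by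
    rw [show ((t : Int) - (1 + k)) = ((t - 1 - k : Nat) : Int) by omega,
      PySem.List.pyGetD_natCast, pvGetD_revtake seq t k (by omega) (by omega)]
  rw [e1, e2]

-- fold over a range restricted to its effective prefix, under a preserved predicate
lemma pvFoldl_range_restrict {α : Type} (P : α → Prop) (f : α → Nat → α) (k0 : Nat) :
    ∀ (k : Nat), k0 ≤ k → (∀ acc j, P acc → P (f acc j)) →
      (∀ acc j, P acc → k0 ≤ j → j < k → f acc j = acc) →
      ∀ (x : α), P x → (List.range k).foldl f x = (List.range k0).foldl f x := by
  intro k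
  induction k with
  | zero => intro h _ _ x _; rw [Nat.le_zero.mp h]
  | succ k ih =>
    intro h hP hid x hx
    by_cases hk : k0 = k + 1
    · rw [hk]
    · have hPfold : ∀ (l : List Nat) (y : α), P y → P (l.foldl f y) := by
        intro l
        induction l with
        | nil => intro y hy; exact hy
        | cons a as ih2 => intro y hy; exact ih2 _ (hP y a hy)
      rw [List.range_succ, List.foldl_append, List.foldl_cons, List.foldl_nil,
        hid _ k (hPfold _ x hx) (by omega) (by omega)]
      exact ih (by omega) hP (fun acc j hacc hj hjk => hid acc j hacc hj (by omega)) x hx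

-- a fold of in-range xor-updates commutes with zero-padding on the right
lemma pvFoldl_setD_append (zs : List Int) (idx v : Nat → Int) :
    ∀ (l : List Nat) (c : List Int), (∀ j ∈ l, 0 ≤ idx j ∧ (idx j).toNat < c.length) →
      l.foldl (fun cc j => PySem.List.pySetD cc (idx j)
          (PySem.Int.bxor (PySem.List.pyGetD cc (idx j) 0) (v j))) (c ++ zs)
        = (l.foldl (fun cc j => PySem.List.pySetD cc (idx j)
            (PySem.Int.bxor (PySem.List.pyGetD cc (idx j) 0) (v j))) c) ++ zs := by
  intro l
  induction l with
  | nil => intro c _; rfl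
  | cons a as ih =>
    intro c hl
    obtain ⟨h0, hlt⟩ := hl a List.mem_cons_self
    simp only [List.foldl_cons]
    have hg : PySem.List.pyGetD (c ++ zs) (idx a) 0 = PySem.List.pyGetD c (idx a) 0 := by
      rw [PySem.List.pyGetD_eq_getElem _ _ h0 (by simp; omega),
        PySem.List.pyGetD_eq_getElem _ _ h0 (by omega)]
      exact List.getElem_append_left _
    have hs : PySem.List.pySetD (c ++ zs) (idx a) (PySem.Int.bxor (PySem.List.pyGetD c (idx a) 0) (v a))
        = PySem.List.pySetD c (idx a) (PySem.Int.bxor (PySem.List.pyGetD c (idx a) 0) (v a)) ++ zs := by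
      rw [PySem.List.pySetD_of_nonneg _ _ h0, PySem.List.pySetD_of_nonneg _ _ h0]
      exact List.set_append_left _ _ hlt
    rw [hg, hs]
    exact ih _ (fun j hj => by
      have := hl j (List.mem_cons_of_mem a hj)
      rwa [PySem.List.length_pySetD])

lemma pvSetD_getD_self (xs : List Int) (i : Int) (h0 : 0 ≤ i) (h : i.toNat < xs.length) :
    PySem.List.pySetD xs i (PySem.List.pyGetD xs i 0) = xs := by
  rw [PySem.List.pySetD_of_nonneg _ _ h0, PySem.List.pyGetD_eq_getElem _ _ h0 (by omega)]
  exact List.set_getElem_self h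

lemma pvLength_pvB_upd (c b : List Int) (i m : Int) : (pvB_upd c b i m).length = c.length := by
  unfold pvB_upd
  generalize PySem.List.enumerate b 0 = l
  induction l generalizing c with
  | nil => rfl
  | cons a as ih =>
    simp only [List.foldl_cons]
    split
    · rw [ih, PySem.List.length_pySetD]
    · exact ih c

lemma pvUpd_eq (cB bB : List Int) (n T : Nat) (m : Int) (hm : -1 ≤ m) (hmt : m < (T : Int))
    (ht : T < n) (hc : cB.length ≤ n) :
    pvUpd (cB ++ List.replicate (n - cB.length) 0) (bB ++ List.replicate (n - bB.length) 0) (T : Int) m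
      = pvB_upd (pvB_pad cB (T : Int)) bB (T : Int) m
          ++ List.replicate (n - (pvB_pad cB (T : Int)).length) 0 := by
  set c1 : List Int := pvB_pad cB (T : Int) with hc1
  have hlen1 : c1.length = cB.length + ((T : Int) + 1 - (cB.length : Int)).toNat := by
    simp [hc1, pvB_pad]
  have hT1 : T + 1 ≤ c1.length := by omega
  have hc1n : c1.length ≤ n := by omega
  set K : Nat := ((T : Int) - m).toNat with hKdef
  have hK : (T : Int) - m = (K : Int) := by omega
  have hKT : K ≤ T + 1 := by omega
  set k0 : Nat := min K bB.length with hk0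
  -- the common core fold
  set fC : List Int → Nat → List Int := fun cc j =>
    PySem.List.pySetD cc ((T : Int) - j)
      (PySem.Int.bxor (PySem.List.pyGetD cc ((T : Int) - j) 0) (bB.getD j 0)) with hfC
  have hidx : ∀ j : Nat, j < k0 → 0 ≤ (T : Int) - j ∧ ((T : Int) - (j : Int)).toNat < c1.length := by
    intro j hj
    constructor <;> omega
  -- A side
  have hA : pvUpd (cB ++ List.replicate (n - cB.length) 0)
        (bB ++ List.replicate (n - bB.length) 0) (T : Int) m
      = (List.range k0).foldl fC (cB ++ List.replicate (n - cB.length) 0) := by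
    unfold pvUpd
    rw [hK, pvFold_pyRange]
    rw [pvFoldl_range_restrict (fun cc => cc.length = n) _ k0 K (by omega)
      (fun acc j hacc => by show (PySem.List.pySetD _ _ _).length = n; rw [PySem.List.length_pySetD]; exact hacc)
      (fun acc j hacc hj hjK => by
        have hjb : bB.length ≤ j := by omega
        rw [pvPyGetD_zext bB _ (j : Int) (by omega)]
        rw [Int.toNat_natCast, List.getD_eq_default _ _ hjb, PySem.Int.bxor_zero]
        exact pvSetD_getD_self acc _ (by omega) (by omega))
      _ (by simp; omega)]
    apply PySem.List.foldl_congr_mem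
    intro acc j hj
    rw [List.mem_range] at hj
    rw [pvPyGetD_zext bB _ (j : Int) (by omega), Int.toNat_natCast]
  -- B side
  have hB : pvB_upd c1 bB (T : Int) m = (List.range k0).foldl fC c1 := by
    unfold pvB_upd
    rw [PySem.List.enumerate_eq_map_pyRange (d := 0), List.foldl_map, PySem.List.len_eq, pvFold_pyRange]
    rw [pvFoldl_range_restrict (fun _ => True) _ k0 bB.length (by omega)
      (fun _ _ _ => trivial)
      (fun acc j _ hj hjb => by
        have : ¬ ((j : Int) < (T : Int) - m) := by omega
        simp only [this, if_false])
      _ trivial]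
    apply PySem.List.foldl_congr_mem
    intro acc j hj
    rw [List.mem_range] at hj
    have hg : ((j : Int)) < (T : Int) - m := by omega
    simp only [hg, if_true]
    rw [PySem.List.pyGetD_natCast]
  rw [hA, hB]
  have hsplit : cB ++ List.replicate (n - cB.length) 0
      = c1 ++ List.replicate (n - c1.length) 0 := by
    rw [hc1]
    unfold pvB_pad
    rw [List.append_assoc, ← List.replicate_add]
    congr 2
    simp only [List.length_append, List.length_replicate]
    omega
  rw [hsplit]
  exact pvFoldl_setD_append _ (fun j => (T : Int) - j) (fun j => bB.getD j 0) (List.range k0) c1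
    (fun j hj => hidx j (List.mem_range.mp hj))

lemma pvB_main (seq : List Int) : ∀ (rest : List Int) (t : Nat) (cB bB profile : List Int),
    rest = seq.drop t → t ≤ seq.length →
    (pvRun seq t).1 = cB ++ List.replicate (seq.length - cB.length) 0 →
    (pvRun seq t).2.1 = bB ++ List.replicate (seq.length - bB.length) 0 →
    cB.length ≤ seq.length → bB.length ≤ seq.length →
    pvB_loop rest ((seq.take t).reverse) cB bB (pvRun seq t).2.2.1 (pvRun seq t).2.2.2 profile
      = profile ++ (List.range (seq.length - t)).map (fun u => (pvRun seq (t + u + 1)).2.2.1) := by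
  intro rest
  induction rest with
  | nil =>
    intro t cB bB profile hdrop ht _ _ _ _
    have : seq.length ≤ t := by
      have := congrArg List.length hdrop
      simp at this
      omega
    rw [show seq.length - t = 0 by omega]
    simp [pvB_loop]
  | cons x xs ih =>
    intro t cB bB profile hdrop ht hcA hbA hcl hbl
    have hx : seq[t]? = some x := by
      have h0 : (seq.drop t)[0]? = some x := by rw [← hdrop]; rfl
      rwa [List.getElem?_drop, Nat.add_zero] at h0
    have htn : t < seq.length := (List.getElem?_eq_some_iff.mp hx).1
    have hxs : xs = seq.drop (t + 1) := by
      have := congrArg List.tail hdrop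
      simpa [List.tail_drop] using this
    have hinv := pvInv_run seq t
    rcases hP : pvRun seq t with ⟨cA, bA, L, m⟩
    rw [hP] at hinv hcA hbA
    simp only [pvInv] at hinv
    obtain ⟨hlenc, hlenb, hL0, hLt, hm0, hmt⟩ := hinv
    simp only at hcA hbA hlenc hlenb
    have hLcast : L = ((L.toNat : Nat) : Int) := by omega
    have hhist : (((seq.take t).reverse).length : Int) = (t : Int) := by simp; omega
    have hnext : x :: (seq.take t).reverse = (seq.take (t + 1)).reverse := by
      rw [List.take_add_one, hx]
      simp
    have hd : (List.zip (PySem.List.slice cB (some 1) (some (L + 1))) ((seq.take t).reverse)).foldl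
        (fun d p => PySem.Int.bxor d (PySem.Int.band p.1 p.2)) x
        = pvDisc seq cA (t : Int) L := by
      rw [show x = seq.getD t 0 by rw [List.getD_eq_getElem?_getD, hx]; rfl]
      rw [hLcast, hcA, pvDisc_eq seq cB _ t L.toNat (by omega) htn]
    have hstep : pvRun seq (t + 1) = pvStep seq (cA, bA, L, m) (t : Int) := by
      rw [pvRun_succ, hP]
    have hrange : (List.range (seq.length - t)).map (fun u => (pvRun seq (t + u + 1)).2.2.1)
        = (pvRun seq (t + 1)).2.2.1
            :: (List.range (seq.length - (t + 1))).map (fun u => (pvRun seq ((t + 1) + u + 1)).2.2.1) := by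
      rw [show seq.length - t = (seq.length - (t + 1)) + 1 by omega, List.range_succ_eq_map,
        List.map_cons, List.map_map]
      refine congrArg₂ _ (by norm_num) (List.map_congr_left ?_)
      intro u _
      show (pvRun seq (t + (u + 1) + 1)).2.2.1 = (pvRun seq ((t + 1) + u + 1)).2.2.1
      have : t + (u + 1) + 1 = (t + 1) + u + 1 := by omega
      rw [this]
    rw [pvB_loop]
    simp only [hhist, hd]
    by_cases hd0 : pvDisc seq cA (t : Int) L = 0
    · -- no discrepancy: state unchanged
      rw [if_neg (by simp [hd0])]
      have hstA : pvRun seq (t + 1) = (cA, bA, L, m) := by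
        rw [hstep]
        simp [pvStep, hd0]
      have ihx := ih (t + 1) cB bB (profile ++ [L]) hxs (by omega)
        (by rw [hstA]; exact hcA) (by rw [hstA]; exact hbA) hcl hbl
      rw [hstA] at ihx
      simp only at ihx
      rw [hnext, ihx, hrange, hstA]
      simp
    · rw [if_pos (by simp [hd0])]
      have hcupd : pvUpd cA bA (t : Int) m
          = pvB_upd (pvB_pad cB (t : Int)) bB (t : Int) m
              ++ List.replicate (seq.length - (pvB_upd (pvB_pad cB (t : Int)) bB (t : Int) m).length) 0 := by
        rw [pvLength_pvB_upd, hcA, hbA]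
        exact pvUpd_eq cB bB seq.length t m hm0 hmt htn hcl
      have hlen2 : (pvB_upd (pvB_pad cB (t : Int)) bB (t : Int) m).length ≤ seq.length := by
        rw [pvLength_pvB_upd]
        simp only [pvB_pad, List.length_append, List.length_replicate]
        omega
      have hfd : PySem.Int.floordiv (t : Int) 2 = ((t / 2 : Nat) : Int) :=
        PySem.Int.floordiv_natCast t 2
      by_cases hcond : L ≤ PySem.Int.floordiv (t : Int) 2
      · rw [if_pos (by rw [hfd] at hcond; omega)]
        have hstA : pvRun seq (t + 1)
            = (pvUpd cA bA (t : Int) m, cA, (t : Int) + 1 - L, (t : Int)) := by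
          rw [hstep]
          simp only [pvStep]
          rw [if_pos hd0, if_pos hcond]
        have ihx := ih (t + 1) (pvB_upd (pvB_pad cB (t : Int)) bB (t : Int) m) cB
          (profile ++ [(t : Int) + 1 - L]) hxs (by omega)
          (by rw [hstA]; exact hcupd) (by rw [hstA]; exact hcA) hlen2 hcl
        rw [hstA] at ihx
        simp only at ihx
        rw [hnext, ihx, hrange, hstA]
        simp
      · rw [if_neg (by rw [hfd] at hcond; omega)]
        have hstA : pvRun seq (t + 1) = (pvUpd cA bA (t : Int) m, bA, L, m) := by
          rw [hstep]
          simp only [pvStep]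
          rw [if_pos hd0, if_neg hcond]
        have ihx := ih (t + 1) (pvB_upd (pvB_pad cB (t : Int)) bB (t : Int) m) bB
          (profile ++ [L]) hxs (by omega)
          (by rw [hstA]; exact hcupd) (by rw [hstA]; exact hbA) hlen2 hbl
        rw [hstA] at ihx
        simp only at ihx
        rw [hnext, ihx, hrange, hstA]
        simp

lemma pvB_eq (seq : List Int) :
    calculate_complexity_profile_alt seq
      = (List.range seq.length).map (fun t => (pvRun seq (t + 1)).2.2.1) := by
  unfold calculate_complexity_profile_alt
  cases seq with
  | nil => rfl
  | cons y ys =>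
    have h0 : (pvRun (y :: ys) 0).1 = [1] ++ List.replicate ((y :: ys).length - 1) 0 := by
      show (pvInit (y :: ys)).1 = _
      rw [pvInit]
      show PySem.List.pySetD (List.replicate (ys.length + 1) 0) 0 1 = _
      rw [PySem.List.pySetD_of_nonneg _ _ le_rfl, List.replicate_succ]
      simp
    have hmain := pvB_main (y :: ys) (y :: ys) 0 [1] [1] [] rfl (by simp)
      (by simpa using h0) (by simpa using h0) (by simp) (by simp)
    have e1 : (pvRun (y :: ys) 0).2.2.1 = 0 := rfl
    have e2 : (pvRun (y :: ys) 0).2.2.2 = -1 := rfl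
    rw [e1, e2] at hmain
    simpa using hmain

-- ===== VERDICT (by name: the statement is the Claim_ definition above) =====
theorem calculate_complexity_profile_spec : Claim_equal_calculate_complexity_profile := by
  intro seq _
  unfold Spec_calculate_complexity_profile
  rw [pvA_eq, pvB_eq]
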